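-- pv_equiv track=rewrite | github.com/Samiran2004/Codes | Placement Sheet/Arrays/Initial Startups/Python/Find_Duplicates_Number.py | findDuplicatesBruteForce
-- ===== SOURCE A (Python) =====
-- def findDuplicatesBruteForce(arr):
--     if(len(arr) == 0):
--         return
--
--     for i in range(0, len(arr)-2):
--         currData = arr[i]
--
--         for j in range(i+1, len(arr)-1):
--             if(currData == arr[j]):
--                 return currData
--
--     return -1
-- ===== SOURCE B (Python) =====
-- def findDuplicatesBruteForce(arr):
--     if not arr:
--         return None
--     seen = set()
--     ans = -1
--     for x in reversed(arr):
--         if x in seen: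
--             ans = x
--         seen.add(x)
--     return ans
-- ===== Notes on version B (the rewrite author's own statement) =====
-- stated objective: alternative
-- what changed: Replaces the quadratic nested index loops with a single backward pass over the list keeping a set of values seen so far, recording the value whose first occurrence is earliest among those repeated later; B also scans the whole list, fixing A's loop bounds that never consider the last element.
-- intended difference: On non-empty lists whose last element duplicates an earlier element before any duplicate occurs within the first n-1 elements (unless both answers would be -1), A's buggy loop bounds ignore the last element and return -1 or a later duplicate, while B returns that earliest duplicated value, which is the intended answer for finding the first duplicate. — e.g. on findDuplicatesBruteForce([1, 2, 1]): A returns some (-1), B returns some 1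
import Mathlib
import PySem

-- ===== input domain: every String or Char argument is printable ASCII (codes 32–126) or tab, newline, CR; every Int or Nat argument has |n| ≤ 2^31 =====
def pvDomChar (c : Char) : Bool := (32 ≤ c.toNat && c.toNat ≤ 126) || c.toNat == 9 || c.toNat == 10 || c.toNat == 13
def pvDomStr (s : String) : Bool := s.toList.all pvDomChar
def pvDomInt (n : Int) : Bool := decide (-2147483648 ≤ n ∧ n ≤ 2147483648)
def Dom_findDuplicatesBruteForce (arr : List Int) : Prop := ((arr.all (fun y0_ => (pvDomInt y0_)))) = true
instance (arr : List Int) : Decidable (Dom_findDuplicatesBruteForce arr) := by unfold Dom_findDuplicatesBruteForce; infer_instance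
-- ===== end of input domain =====

-- B replaces A's nested index loops by a single backward pass with a seen-set,
-- and (stated as D_) scans the whole list where A's buggy bounds ignore the last element.


-- ===== PORT A =====
-- indices i, j produced by the ranges are always in bounds, so pyGetD's default 0 is never read
def findDuplicatesBruteForce (arr : List Int) : Option Int :=
  if arr.length = 0 then none
  else
    match (PySem.List.pyRange 0 ((arr.length : Int) - 2) 1).findSome? (fun i =>
        let currData := PySem.List.pyGetD arr i 0
        (PySem.List.pyRange (i + 1) ((arr.length : Int) - 1) 1).findSome? (fun j =>
          if PySem.List.pyGetD arr j 0 = currData then some currData else none)) with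
    | some v => some v
    | none => some (-1)

-- ===== PORT B =====
def findDuplicatesBruteForce_alt (arr : List Int) : Option Int :=
  if arr = [] then none
  else
    let st := arr.reverse.foldl
      (fun (s : PySem.Set Int × Int) x =>
        (PySem.Set.add s.1 x, if x ∈ s.1 then x else s.2))
      (PySem.Set.empty, -1)
    some st.2

-- ===== PRECONDITION & SPEC =====
-- On non-empty lists whose last element duplicates an earlier element before any duplicate occurs
-- within the first n-1 elements (except when both answers would be -1), A's buggy loop bounds
-- ignore the last element and return -1 or a later duplicate, while B returns that earliest
-- duplicated value, which is the intended answer for finding the first duplicate.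
def D_findDuplicatesBruteForce (arr : List Int) : Prop :=
  arr ≠ [] ∧
  (∃ j < arr.dropLast.length, arr.dropLast[j]? = some (arr.getLastD 0) ∧
      ∀ i ≤ j, ∀ k < arr.dropLast.length, i < k → arr.dropLast[i]? ≠ arr.dropLast[k]?) ∧
  (arr.getLastD 0 ≠ -1 ∨ ¬ arr.dropLast.Nodup)

instance (arr : List Int) : Decidable (D_findDuplicatesBruteForce arr) := by
  unfold D_findDuplicatesBruteForce; infer_instance

def Spec_findDuplicatesBruteForce (arr : List Int) (out : Option Int) : Prop :=
  ¬ D_findDuplicatesBruteForce arr → out = findDuplicatesBruteForce_alt arr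
instance (arr : List Int) (out : Option Int) : Decidable (Spec_findDuplicatesBruteForce arr out) := by
  unfold Spec_findDuplicatesBruteForce; infer_instance

def pvDiffWitness_findDuplicatesBruteForce : List Int := [1, 2, 1]
def pvDiffWitnessOut_findDuplicatesBruteForce : (Option Int) × (Option Int) := (some (-1), some 1)

-- ===== CLAIM (what is proved, stated in full; the proofs are below) =====
def Claim_unchanged_findDuplicatesBruteForce : Prop := ∀ (arr : List Int), Dom_findDuplicatesBruteForce arr → Spec_findDuplicatesBruteForce arr (findDuplicatesBruteForce arr)
def Claim_changed_findDuplicatesBruteForce : Prop := Dom_findDuplicatesBruteForce (pvDiffWitness_findDuplicatesBruteForce) ∧ D_findDuplicatesBruteForce (pvDiffWitness_findDuplicatesBruteForce) ∧ findDuplicatesBruteForce (pvDiffWitness_findDuplicatesBruteForce) = pvDiffWitnessOut_findDuplicatesBruteForce.1 ∧ findDuplicatesBruteForce_alt (pvDiffWitness_findDuplicatesBruteForce) = pvDiffWitnessOut_findDuplicatesBruteForce.2 ∧ pvDiffWitnessOut_findDuplicatesBruteForce.1 ≠ pvDiffWitnessOut_findDuplicatesBruteForce.2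
def Claim_exact_findDuplicatesBruteForce : Prop := ∀ (arr : List Int), Dom_findDuplicatesBruteForce arr → D_findDuplicatesBruteForce arr → findDuplicatesBruteForce arr ≠ findDuplicatesBruteForce_alt arr

-- ===== LEMMAS AND PROOFS =====

-- first value (by index) that occurs again later in the list
def pvFirst? : List Int → Option Int
  | [] => none
  | x :: xs => if x ∈ xs then some x else pvFirst? xs

theorem pvFindSome?_congr {α β : Type} (l : List α) (f g : α → Option β)
    (h : ∀ x ∈ l, f x = g x) : l.findSome? f = l.findSome? g := by
  induction l with
  | nil => rfl
  | cons x xs ih =>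
    rw [List.findSome?_cons, List.findSome?_cons, h x List.mem_cons_self]
    cases g x with
    | some v => rfl
    | none => exact ih (fun y hy => h y (List.mem_cons_of_mem _ hy))

theorem pvInner_char (xs : List Int) (c : Int) (b : Int) (hb : b ≤ (xs.length : Int)) :
    ∀ (m : Nat) (a : Int), 0 ≤ a → (b - a).toNat = m →
    (PySem.List.pyRange a b 1).findSome?
        (fun j => if PySem.List.pyGetD xs j 0 = c then some c else none)
      = if c ∈ (xs.take b.toNat).drop a.toNat then some c else none := by
  intro m
  induction m with
  | zero =>
    intro a ha hm
    have hba : b ≤ a := by omega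
    rw [PySem.List.pyRange_one_eq_nil hba]
    have : (xs.take b.toNat).drop a.toNat = [] := by
      apply List.drop_eq_nil_of_le
      have := List.length_take_le b.toNat xs
      omega
    simp [this]
  | succ m ih =>
    intro a ha hm
    have hab : a < b := by omega
    rw [PySem.List.pyRange_one_cons hab, List.findSome?_cons]
    have hlt : a.toNat < xs.length := by omega
    have hget : PySem.List.pyGetD xs a 0 = xs[a.toNat] :=
      PySem.List.pyGetD_eq_getElem _ 0 ha (by omega)
    have hdrop : (xs.take b.toNat).drop a.toNat
        = xs[a.toNat] :: (xs.take b.toNat).drop (a + 1).toNat := by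
      have hidx : (a + 1).toNat = a.toNat + 1 := by omega
      rw [hidx, List.drop_eq_getElem_cons (by simpa using (by omega : a.toNat < min b.toNat xs.length)),
        List.getElem_take]
    rw [hget, hdrop]
    by_cases hx : xs[a.toNat] = c
    · simp [hx]
    · have h1 : (if xs[a.toNat] = c then some c else none) = none := by simp [hx]
      rw [h1]
      have h2 := ih (a + 1) (by omega) (by omega)
      simp only [h2, List.mem_cons]
      by_cases hc : c ∈ (xs.take b.toNat).drop (a + 1).toNat
      · simp [hc]
      · have hcx : ¬ c = xs[a.toNat] := fun hh => hx hh.symm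
        simp [hc, hcx]

theorem pvOuter_char (p : List Int) :
    ∀ (m : Nat) (a : Int), 0 ≤ a → ((p.length : Int) - a).toNat = m →
    (PySem.List.pyRange a (p.length : Int) 1).findSome?
        (fun i => if PySem.List.pyGetD p i 0 ∈ p.drop (i + 1).toNat
                  then some (PySem.List.pyGetD p i 0) else none)
      = pvFirst? (p.drop a.toNat) := by
  intro m
  induction m with
  | zero =>
    intro a ha hm
    rw [PySem.List.pyRange_one_eq_nil (by omega)]
    rw [List.drop_eq_nil_of_le (by omega)]
    rfl
  | succ m ih =>
    intro a ha hm
    have hab : a < (p.length : Int) := by omega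
    rw [PySem.List.pyRange_one_cons hab, List.findSome?_cons]
    have hget : PySem.List.pyGetD p a 0 = p[a.toNat] :=
      PySem.List.pyGetD_eq_getElem _ 0 ha (by omega)
    have hdrop : p.drop a.toNat = p[a.toNat] :: p.drop (a + 1).toNat := by
      have hidx : (a + 1).toNat = a.toNat + 1 := by omega
      rw [hidx, List.drop_eq_getElem_cons (by omega)]
    rw [hget, hdrop, pvFirst?]
    by_cases hc : p[a.toNat] ∈ p.drop (a + 1).toNat
    · simp [hc]
    · rw [if_neg hc, if_neg hc]
      exact ih (a + 1) (by omega) (by omega)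

theorem pvGetD_prefix (p : List Int) (z i : Int) (h0 : 0 ≤ i) (h1 : i < (p.length : Int)) :
    PySem.List.pyGetD (p ++ [z]) i 0 = PySem.List.pyGetD p i 0 := by
  rw [PySem.List.pyGetD_eq_getElem _ 0 h0 (by simp; omega),
      PySem.List.pyGetD_eq_getElem _ 0 h0 (by omega)]
  exact List.getElem_append_left (by omega)

theorem pvA_char (p : List Int) (z : Int) :
    findDuplicatesBruteForce (p ++ [z]) = some ((pvFirst? p).getD (-1)) := by
  rw [findDuplicatesBruteForce, if_neg (by simp)]
  have hl : ((p ++ [z]).length) = p.length + 1 := by simp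
  have e1 : (((p ++ [z]).length : Int)) - 2 = (p.length : Int) - 1 := by
    rw [hl]; push_cast; ring
  have e2 : (((p ++ [z]).length : Int)) - 1 = (p.length : Int) := by
    rw [hl]; push_cast; ring
  rw [e1, e2]
  have hcongr : (PySem.List.pyRange 0 ((p.length : Int) - 1) 1).findSome? (fun i =>
        let currData := PySem.List.pyGetD (p ++ [z]) i 0
        (PySem.List.pyRange (i + 1) ((p.length : Int)) 1).findSome? (fun j =>
          if PySem.List.pyGetD (p ++ [z]) j 0 = currData then some currData else none))
      = (PySem.List.pyRange 0 ((p.length : Int) - 1) 1).findSome?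
        (fun i => if PySem.List.pyGetD p i 0 ∈ p.drop (i + 1).toNat
                  then some (PySem.List.pyGetD p i 0) else none) := by
    apply pvFindSome?_congr
    intro i hi
    rw [PySem.List.mem_pyRange_one] at hi
    simp only
    rw [pvGetD_prefix p z i hi.1 (by omega)]
    rw [pvInner_char (p ++ [z]) (PySem.List.pyGetD p i 0) ((p.length : Int))
        (by simp) ((p.length : Int) - (i + 1)).toNat (i + 1) (by omega) rfl]
    have htake : (p ++ [z]).take ((p.length : Int)).toNat = p := by
      rw [Int.toNat_natCast]
      exact List.take_left
    rw [htake]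
  rw [hcongr]
  have hext : (PySem.List.pyRange 0 ((p.length : Int) - 1) 1).findSome?
        (fun i => if PySem.List.pyGetD p i 0 ∈ p.drop (i + 1).toNat
                  then some (PySem.List.pyGetD p i 0) else none)
      = (PySem.List.pyRange 0 ((p.length : Int)) 1).findSome?
        (fun i => if PySem.List.pyGetD p i 0 ∈ p.drop (i + 1).toNat
                  then some (PySem.List.pyGetD p i 0) else none) := by
    rcases Nat.eq_zero_or_pos p.length with h0 | h0
    · rw [PySem.List.pyRange_one_eq_nil (by omega), PySem.List.pyRange_one_eq_nil (by omega)]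
    · have hsplit : PySem.List.pyRange 0 ((p.length : Int)) 1
          = PySem.List.pyRange 0 ((p.length : Int) - 1) 1 ++ [(p.length : Int) - 1] := by
        have h := PySem.List.pyRange_one_succ_right (a := 0) (b := (p.length : Int) - 1) (by omega)
        rw [show (p.length : Int) - 1 + 1 = (p.length : Int) by ring] at h
        exact h
      rw [hsplit, List.findSome?_append]
      have hnil : p.drop (((p.length : Int) - 1) + 1).toNat = [] :=
        List.drop_eq_nil_of_le (by omega)
      rw [show ((PySem.List.pyRange 0 ((p.length : Int) - 1) 1).findSome?
          (fun i => if PySem.List.pyGetD p i 0 ∈ p.drop (i + 1).toNat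
                    then some (PySem.List.pyGetD p i 0) else none)).or
          ((List.findSome? (fun i => if PySem.List.pyGetD p i 0 ∈ p.drop (i + 1).toNat
                    then some (PySem.List.pyGetD p i 0) else none) [(p.length : Int) - 1]))
        = ((PySem.List.pyRange 0 ((p.length : Int) - 1) 1).findSome?
          (fun i => if PySem.List.pyGetD p i 0 ∈ p.drop (i + 1).toNat
                    then some (PySem.List.pyGetD p i 0) else none)).or none from by
          rw [List.findSome?]; simp]
      cases hx : (PySem.List.pyRange 0 ((p.length : Int) - 1) 1).findSome?
          (fun i => if PySem.List.pyGetD p i 0 ∈ p.drop (i + 1).toNat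
                    then some (PySem.List.pyGetD p i 0) else none) <;> rfl
  rw [hext, pvOuter_char p ((p.length : Int) - 0).toNat 0 (by omega) rfl]
  cases hp : pvFirst? (p.drop (Int.toNat 0)) <;> simp_all

def pvGA (s0 : List Int) (a0 : Int) : List Int → Int
  | [] => a0
  | x :: xs => if x ∈ xs ∨ x ∈ s0 then x else pvGA s0 a0 xs

theorem pvB_fold (l : List Int) (s0 : PySem.Set Int) (a0 : Int) :
    (∀ y, y ∈ (l.foldr (fun x s => (PySem.Set.add s.1 x, if x ∈ s.1 then x else s.2)) (s0, a0)).1 ↔ y ∈ l ∨ y ∈ s0)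
    ∧ (l.foldr (fun x s => (PySem.Set.add s.1 x, if x ∈ s.1 then x else s.2)) (s0, a0)).2 = pvGA s0 a0 l := by
  induction l with
  | nil => simp [pvGA]
  | cons x xs ih =>
    constructor
    · intro y
      simp only [List.foldr_cons, PySem.Set.mem_add, ih.1 y, List.mem_cons]
      tauto
    · by_cases h : x ∈ xs ∨ x ∈ s0 <;>
        simp [pvGA, h, ih.1, ih.2]

theorem pvGA_nil (a0 : Int) (l : List Int) : pvGA [] a0 l = (pvFirst? l).getD a0 := by
  induction l with
  | nil => rfl
  | cons x xs ih =>
    simp only [pvGA, pvFirst?, List.mem_nil_iff, or_false]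
    split <;> simp [ih]

theorem pvB_char (arr : List Int) (h : arr ≠ []) :
    findDuplicatesBruteForce_alt arr = some ((pvFirst? arr).getD (-1)) := by
  rw [findDuplicatesBruteForce_alt, if_neg h]
  simp only [List.foldl_reverse]
  rw [(pvB_fold arr PySem.Set.empty (-1)).2]
  rw [show (PySem.Set.empty : PySem.Set Int) = [] from rfl, pvGA_nil]

def pvCS : List Int → Int → Prop
  | [], _ => False
  | x :: xs, z => if x ∈ xs then False else if x = z then True else pvCS xs z

theorem pvFirst?_mem {l : List Int} {v : Int} (h : pvFirst? l = some v) : v ∈ l := by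
  induction l with
  | nil => simp [pvFirst?] at h
  | cons x xs ih =>
    rw [pvFirst?] at h
    by_cases hx : x ∈ xs
    · rw [if_pos hx] at h
      simp at h
      simp [h]
    · rw [if_neg hx] at h
      exact List.mem_cons_of_mem _ (ih h)

theorem pvFirst?_eq_none_iff {l : List Int} : pvFirst? l = none ↔ l.Nodup := by
  induction l with
  | nil => simp [pvFirst?]
  | cons x xs ih =>
    rw [pvFirst?, List.nodup_cons]
    by_cases hx : x ∈ xs
    · simp [hx]
    · simp [hx, ih]

theorem pvC1_iff_CS (p : List Int) (z : Int) :
    (∃ j < p.length, p[j]? = some z ∧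
        ∀ i ≤ j, ∀ k < p.length, i < k → p[i]? ≠ p[k]?) ↔ pvCS p z := by
  induction p with
  | nil => simp [pvCS]
  | cons x xs ih =>
    by_cases hx : x ∈ xs
    · rw [pvCS, if_pos hx]
      simp only [iff_false]
      rintro ⟨j, hj, hjz, hall⟩
      obtain ⟨k0, hk0⟩ := List.mem_iff_getElem?.mp hx
      obtain ⟨hk0len, -⟩ := List.getElem?_eq_some_iff.mp hk0
      exact hall 0 (Nat.zero_le j) (k0 + 1) (by simp; omega) (by omega)
        (by simp [hk0])
    · by_cases hz : x = z
      · rw [pvCS, if_neg hx, if_pos hz]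
        simp only [iff_true]
        refine ⟨0, by simp, by simp [hz], ?_⟩
        intro i hi k hk hik
        interval_cases i
        obtain ⟨k', rfl⟩ : ∃ k', k = k' + 1 := ⟨k - 1, by omega⟩
        intro hcontra
        simp only [List.getElem?_cons_zero, List.getElem?_cons_succ] at hcontra
        exact hx (List.mem_iff_getElem?.mpr ⟨k', hcontra.symm⟩)
      · rw [pvCS, if_neg hx, if_neg hz, ← ih]
        constructor
        · rintro ⟨j, hj, hjz, hall⟩
          match j with
          | 0 => simp at hjz; exact absurd hjz hz
          | j' + 1 =>
            refine ⟨j', by simp at hj; omega, by simpa using hjz, ?_⟩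
            intro i hi k hk hik
            have := hall (i + 1) (by omega) (k + 1) (by simp; omega) (by omega)
            simpa using this
        · rintro ⟨j', hj', hjz, hall⟩
          refine ⟨j' + 1, by simp; omega, by simpa using hjz, ?_⟩
          intro i hi k hk hik
          match i, k with
          | 0, 0 => omega
          | 0, k' + 1 =>
            intro hcontra
            simp only [List.getElem?_cons_zero, List.getElem?_cons_succ] at hcontra
            exact hx (List.mem_iff_getElem?.mpr ⟨k', hcontra.symm⟩)
          | i' + 1, 0 => omega
          | i' + 1, k' + 1 =>
            have := hall i' (by omega) k' (by simp at hk; omega) (by omega)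
            simpa using this

theorem pvMain_iff (p : List Int) (z : Int) :
    (pvCS p z ∧ (z ≠ -1 ∨ ¬ p.Nodup)) ↔
      (pvFirst? (p ++ [z])).getD (-1) ≠ (pvFirst? p).getD (-1) := by
  induction p with
  | nil => simp [pvCS, pvFirst?]
  | cons x xs ih =>
    rw [List.cons_append, pvFirst?, pvFirst?, pvCS, List.nodup_cons]
    by_cases hx : x ∈ xs
    · have hx2 : x ∈ xs ++ [z] := List.mem_append_left _ hx
      simp [hx, hx2]
    · by_cases hz : x = z
      · have hx2 : x ∈ xs ++ [z] := by simp [hz]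
        rw [if_pos hx2, if_neg hx, if_neg hx, if_pos hz]
        simp only [true_and, Option.getD_some]
        rcases hnd : pvFirst? xs with _ | v
        · have := pvFirst?_eq_none_iff.mp hnd
          simp only [Option.getD_none]
          constructor
          · rintro (h1 | h2)
            · subst hz; exact h1
            · exact absurd ⟨hx, this⟩ h2
          · intro h; subst hz; exact Or.inl h
        · have hv : v ∈ xs := pvFirst?_mem hnd
          have hne : ¬ (pvFirst? xs = none) := by simp [hnd]
          have hnnd : ¬ xs.Nodup := fun hh => hne (pvFirst?_eq_none_iff.mpr hh)
          simp only [Option.getD_some]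
          constructor
          · intro _ hcontra
            subst hz; rw [hcontra] at hx; exact hx hv
          · intro _
            right
            intro hh
            exact hnnd hh.2
      · have hx2 : x ∉ xs ++ [z] := by simp [hx, hz]
        rw [if_neg hx2, if_neg hx, if_neg hx, if_neg hz,
          show (¬(x ∉ xs ∧ xs.Nodup)) ↔ ¬ xs.Nodup from by simp [hx], ih]

theorem pvD_iff (p : List Int) (z : Int) :
    D_findDuplicatesBruteForce (p ++ [z]) ↔
      (pvFirst? (p ++ [z])).getD (-1) ≠ (pvFirst? p).getD (-1) := by
  rw [← pvMain_iff, ← pvC1_iff_CS]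
  unfold D_findDuplicatesBruteForce
  simp

-- ===== VERDICT (by name: the statement is the Claim_ definition above) =====
theorem findDuplicatesBruteForce_spec : Claim_unchanged_findDuplicatesBruteForce := by
  intro arr _ hD
  rcases List.eq_nil_or_concat arr with rfl | ⟨p, z, hpz⟩
  · rfl
  · rw [List.concat_eq_append] at hpz
    subst hpz
    rw [pvA_char p z, pvB_char _ (by simp)]
    have h := (not_iff_not.mpr (pvD_iff p z)).mp hD
    simp only [not_not] at h
    rw [h]

theorem findDuplicatesBruteForce_changed : Claim_changed_findDuplicatesBruteForce := by
  unfold Claim_changed_findDuplicatesBruteForce; decide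

theorem findDuplicatesBruteForce_tight : Claim_exact_findDuplicatesBruteForce := by
  intro arr _ hD
  rcases List.eq_nil_or_concat arr with rfl | ⟨p, z, hpz⟩
  · exact absurd rfl hD.1
  · rw [List.concat_eq_append] at hpz
    subst hpz
    rw [pvA_char p z, pvB_char _ (by simp)]
    have h := (pvD_iff p z).mp hD
    intro hEq
    exact h (Option.some_injective _ hEq).symm
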